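-- pv_equiv track=rewrite | github.com/danuni29/Code | week7/hw09_main.py | maximum_rainfall_event
-- ===== SOURCE A (Python) =====
-- def maximum_rainfall_event(rainfall):
--     rain_event = 0
--     rain_event_2 = []
--     for i in rainfall:
--         if i > 0:
--             rain_event += i
--         else:
--             rain_event_2.append(rain_event)
--             rain_event = 0
--     return max(rain_event_2)
-- ===== SOURCE B (Python) =====
-- from itertools import accumulate
--
-- def maximum_rainfall_event(rainfall):
--     # Prefix sums of the rainfall clamped at 0; an event sum is a difference
--     # of two prefix sums, one pair per dry (non-positive) reading.
--     prefix = [0] + list(accumulate(x if x > 0 else 0 for x in rainfall))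
--     cuts = [j for j, x in enumerate(rainfall) if x <= 0]
--     return max(prefix[j] - prefix[a + 1] for a, j in zip([-1] + cuts, cuts))
-- ===== Notes on version B (the rewrite author's own statement) =====
-- stated objective: alternative
-- what changed: B replaces A's single stateful pass (running accumulator reset at each non-positive element, collecting event sums into a list) by a staged index-arithmetic algorithm: it precomputes prefix sums of the rainfall clamped at 0, lists the indices of non-positive readings, and obtains each event sum as a difference of two prefix sums, one per cut; max over an empty generator raises ValueError exactly where A's max([]) does, so Pre_ excludes inputs with no non-positive element.
import Mathlib
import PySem

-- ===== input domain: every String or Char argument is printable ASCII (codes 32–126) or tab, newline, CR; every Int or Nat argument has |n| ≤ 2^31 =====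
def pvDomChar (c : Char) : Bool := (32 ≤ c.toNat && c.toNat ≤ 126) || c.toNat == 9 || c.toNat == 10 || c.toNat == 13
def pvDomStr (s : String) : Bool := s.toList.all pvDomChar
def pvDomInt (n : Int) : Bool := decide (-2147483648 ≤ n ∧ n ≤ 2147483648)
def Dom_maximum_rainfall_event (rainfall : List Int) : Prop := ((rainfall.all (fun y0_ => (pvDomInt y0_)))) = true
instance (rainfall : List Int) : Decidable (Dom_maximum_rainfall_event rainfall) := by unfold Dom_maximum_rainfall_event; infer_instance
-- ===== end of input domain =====

-- B replaces A's stateful accumulator pass by a staged algorithm: prefix sums of the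
-- clamped rainfall + the list of non-positive ("cut") indices; each event sum is a
-- difference of two prefix sums (alternative decomposition, same O(n) cost).
-- Both Pythons raise ValueError when rainfall has no non-positive element; Pre_ excludes those inputs.

-- ===== PORT A =====
def maximum_rainfall_event (rainfall : List Int) : Int :=
  -- max(rain_event_2); the ValueError on an empty list lies outside Pre_
  (PySem.List.max?
    (rainfall.foldl
      (fun (st : Int × List Int) i =>
        if i > 0 then (st.1 + i, st.2) else (0, st.2 ++ [st.1]))
      (0, ([] : List Int))).2
    (fun y => y)).getD 0

-- ===== PORT B =====
-- itertools.accumulate over the clamped generator (running sums, no leading 0)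
def pvAccum (acc : Int) : List Int → List Int
  | [] => []
  | x :: r => (acc + x) :: pvAccum (acc + x) r

def maximum_rainfall_event_alt (rainfall : List Int) : Int :=
  -- prefix = [0] + list(accumulate(x if x > 0 else 0 for x in rainfall))
  let pre : List Int := 0 :: pvAccum 0 (rainfall.map (fun x => if x > 0 then x else 0))
  -- cuts = [j for j, x in enumerate(rainfall) if x <= 0]
  let cuts : List Int :=
    (PySem.List.enumerate rainfall 0).filterMap (fun p => if p.2 ≤ 0 then some p.1 else none)
  -- max(prefix[j] - prefix[a + 1] for a, j in zip([-1] + cuts, cuts)); ValueError outside Pre_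
  (PySem.List.max?
    ((List.zip ((-1) :: cuts) cuts).map
      (fun p => (PySem.List.pyGet? pre p.2).getD 0 - (PySem.List.pyGet? pre (p.1 + 1)).getD 0))
    (fun y => y)).getD 0

-- ===== PRECONDITION & SPEC =====
-- Pre_ excludes exactly the inputs on which Python A raises ValueError (max of an empty
-- list): those with no non-positive element; Python B raises ValueError there as well.
def Pre_maximum_rainfall_event (rainfall : List Int) : Prop :=
  ∃ x ∈ rainfall, x ≤ 0
instance (rainfall : List Int) : Decidable (Pre_maximum_rainfall_event rainfall) := by
  unfold Pre_maximum_rainfall_event; infer_instance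

def pvWitness_maximum_rainfall_event : List Int := [3, 2, 0, 5, -1]

def Spec_maximum_rainfall_event (rainfall : List Int) (out : Int) : Prop :=
  out = maximum_rainfall_event_alt rainfall
instance (rainfall : List Int) (out : Int) : Decidable (Spec_maximum_rainfall_event rainfall out) := by
  unfold Spec_maximum_rainfall_event; infer_instance

-- ===== CLAIM =====
def Claim_equal_maximum_rainfall_event : Prop :=
  ∀ (rainfall : List Int), Dom_maximum_rainfall_event rainfall →
    Pre_maximum_rainfall_event rainfall →
    Spec_maximum_rainfall_event rainfall (maximum_rainfall_event rainfall)

-- ===== LEMMAS AND PROOFS =====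

-- the mathematical list of event sums, bridge between the two ports
def pvEv : Int → List Int → List Int
  | _, [] => []
  | acc, x :: r => if x > 0 then pvEv (acc + x) r else acc :: pvEv 0 r

-- A's fold accumulates exactly pvEv
theorem foldA_ev (xs : List Int) (acc : Int) (l : List Int) :
    (xs.foldl (fun (st : Int × List Int) i =>
      if i > 0 then (st.1 + i, st.2) else (0, st.2 ++ [st.1])) (acc, l)).2
    = l ++ pvEv acc xs := by
  induction xs generalizing acc l with
  | nil => simp [pvEv]
  | cons x r ih =>
    simp only [List.foldl, pvEv]
    split
    · exact ih _ _
    · rw [ih]; simp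

-- cut indices of a suffix, with absolute offset
def pvCuts : List Int → Nat → List Nat
  | [], _ => []
  | x :: r, i => if x ≤ 0 then i :: pvCuts r (i + 1) else pvCuts r (i + 1)

-- structural Nat → Int cast of a list (keeps the proofs free of coercion noise)
def pvCastL : List Nat → List Int
  | [] => []
  | c :: cs => (c : Int) :: pvCastL cs

theorem cuts_eq (xs : List Int) (n : Nat) :
    (PySem.List.enumerate xs (n : Int)).filterMap
        (fun p => if p.2 ≤ 0 then some p.1 else none)
    = pvCastL (pvCuts xs n) := by
  induction xs generalizing n with
  | nil => simp [PySem.List.enumerate_nil, pvCuts, pvCastL]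
  | cons x r ih =>
    rw [PySem.List.enumerate_cons]
    have hcast : (n : Int) + 1 = ((n + 1 : Nat) : Int) := by push_cast; ring
    rw [List.filterMap_cons, hcast, ih]
    by_cases hx : x ≤ 0
    · simp only [hx, if_true, pvCuts, pvCastL]
    · simp only [hx, if_false, pvCuts]

-- the (start, cut) pairs zip([-1]+cuts, cuts) walks through
def pvPairs (s : Nat) : List Nat → List (Nat × Nat)
  | [] => []
  | c :: cs => (s, c) :: pvPairs (c + 1) cs

theorem zip_pairs_eq (F : Int → Int → Int) (cs : List Nat) (a : Int) (s : Nat)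
    (h : a + 1 = (s : Int)) :
    (List.zip (a :: pvCastL cs) (pvCastL cs)).map (fun p => F p.2 (p.1 + 1))
    = (pvPairs s cs).map (fun q => F (q.2 : Int) (q.1 : Int)) := by
  induction cs generalizing a s with
  | nil => simp [pvCastL, pvPairs]
  | cons c cs' ih =>
    simp only [pvCastL, pvPairs, List.zip_cons_cons, List.map_cons, h]
    rw [ih (c : Int) (c + 1) (by push_cast; ring)]

-- prefix[k] is the sum of the first k generated values
theorem accumGet (l : List Int) (a : Int) (k : Nat) (hk : k ≤ l.length) :
    (a :: pvAccum a l).getD k 0 = a + (l.take k).sum := by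
  induction l generalizing a k with
  | nil =>
    have hk0 : k = 0 := by simpa using hk
    subst hk0; simp
  | cons x r ih =>
    cases k with
    | zero => simp
    | succ k' =>
      simp only [pvAccum, List.take_succ_cons, List.sum_cons, List.getD_cons_succ]
      rw [ih (a + x) k' (by simpa using hk)]
      ring

-- main bridge: the prefix-difference values over the cut pairs are exactly pvEv
theorem pairs_ev (xs orig : List Int) (n s : Nat) (hs : s ≤ n) (hd : orig.drop n = xs) :
    (pvPairs s (pvCuts xs n)).map
        (fun q =>
          ((0 : Int) :: pvAccum 0 (orig.map (fun x => if x > 0 then x else 0))).getD q.2 0 -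
          ((0 : Int) :: pvAccum 0 (orig.map (fun x => if x > 0 then x else 0))).getD q.1 0)
    = pvEv ((((orig.map (fun x => if x > 0 then x else 0)).drop s).take (n - s)).sum) xs := by
  induction xs generalizing n s with
  | nil => simp [pvCuts, pvPairs, pvEv]
  | cons x r ih =>
    have hn : n < orig.length := by
      by_contra h
      rw [List.drop_eq_nil_of_le (by omega)] at hd
      exact List.cons_ne_nil x r hd.symm
    have hd' : orig.drop (n + 1) = r := by
      rw [← List.drop_drop, hd]; rfl
    have hget : orig[n]? = some x := by
      have h0 : (orig.drop n)[0]? = orig[n + 0]? := List.getElem?_drop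
      rw [hd] at h0
      simpa using h0.symm
    set cl := orig.map (fun x => if x > 0 then x else 0) with hcl
    have hcln : cl.length = orig.length := by simp [hcl]
    simp only [pvCuts]
    by_cases hx : x ≤ 0
    · rw [if_pos hx]
      simp only [pvPairs, List.map_cons]
      rw [pvEv, if_neg (by omega)]
      refine congrArg₂ _ ?_ ?_
      · rw [accumGet cl 0 n (by omega), accumGet cl 0 s (by omega)]
        have hta : cl.take n = cl.take s ++ (cl.drop s).take (n - s) := by
          conv_lhs => rw [show n = s + (n - s) by omega]
          rw [List.take_add]
        rw [hta]
        simp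
      · rw [ih (n + 1) (n + 1) (le_refl _) hd']
        simp
    · rw [if_neg hx]
      rw [pvEv, if_pos (by omega)]
      rw [ih (n + 1) s (by omega) hd']
      have hsplit : (cl.drop s).take (n + 1 - s) =
          (cl.drop s).take (n - s) ++ [x] := by
        rw [show n + 1 - s = (n - s) + 1 by omega, List.take_add_one]
        have hidx : (cl.drop s)[n - s]? = some x := by
          rw [List.getElem?_drop, show s + (n - s) = n by omega, hcl,
            List.getElem?_map, hget, Option.map_some]
          simp [if_pos (by omega : x > 0)]
        rw [hidx]
        rfl
      rw [hsplit]
      simp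

-- ===== VERDICT =====
theorem maximum_rainfall_event_spec : Claim_equal_maximum_rainfall_event := by
  intro rainfall _ _
  unfold Spec_maximum_rainfall_event maximum_rainfall_event maximum_rainfall_event_alt
  rw [foldA_ev]
  simp only [List.nil_append]
  have hc : (PySem.List.enumerate rainfall 0).filterMap
      (fun p => if p.2 ≤ 0 then some p.1 else none) = pvCastL (pvCuts rainfall 0) := by
    simpa using cuts_eq rainfall 0
  rw [hc, zip_pairs_eq
    (fun j i =>
      (PySem.List.pyGet?
        ((0 : Int) :: pvAccum 0 (rainfall.map fun x => if x > 0 then x else 0)) j).getD 0 -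
      (PySem.List.pyGet?
        ((0 : Int) :: pvAccum 0 (rainfall.map fun x => if x > 0 then x else 0)) i).getD 0)
    (pvCuts rainfall 0) (-1) 0 (by norm_num)]
  have hpt : ∀ q : Nat × Nat,
      (PySem.List.pyGet?
          ((0 : Int) :: pvAccum 0 (rainfall.map fun x => if x > 0 then x else 0))
          ((q.2 : Nat) : Int)).getD 0 -
      (PySem.List.pyGet?
          ((0 : Int) :: pvAccum 0 (rainfall.map fun x => if x > 0 then x else 0))
          ((q.1 : Nat) : Int)).getD 0
      = ((0 : Int) :: pvAccum 0 (rainfall.map fun x => if x > 0 then x else 0)).getD q.2 0 -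
        ((0 : Int) :: pvAccum 0 (rainfall.map fun x => if x > 0 then x else 0)).getD q.1 0 := by
    intro q
    rw [PySem.List.pyGet?_natCast, PySem.List.pyGet?_natCast]
    simp [List.getD]
  rw [List.map_congr_left (fun q _ => hpt q),
    pairs_ev rainfall rainfall 0 0 (le_refl _) (by simp)]
  simp
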